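-- pv_equiv track=rewrite | github.com/RayZh-hs/WaveCraft | src/wavecraft/phase2_extract_tiles.py | allocate_balanced_counts
-- ===== SOURCE A (Python) =====
-- from collections.abc import Hashable
--
-- def allocate_balanced_counts(available_by_key: dict[Hashable, int], max_patches: int) -> dict[Hashable, int]:
--     keys = sorted((key for key, count in available_by_key.items() if count > 0), key=str)
--     if not keys:
--         return {}
--
--     target = min(max_patches, sum(available_by_key.values()))
--     counts = {key: min(available_by_key[key], target // len(keys)) for key in keys}
--     remaining = target - sum(counts.values())
--
--     while remaining > 0:
--         progressed = False
--         for key in keys: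
--             if counts[key] < available_by_key[key]:
--                 counts[key] += 1
--                 remaining -= 1
--                 progressed = True
--                 if remaining == 0:
--                     break
--         if not progressed:
--             break
--     return counts
-- ===== SOURCE B (Python) =====
-- def allocate_balanced_counts(available_by_key, max_patches):
--     avail = sorted(((k, v) for k, v in available_by_key.items() if v > 0),
--                    key=lambda kv: str(kv[0]))
--     if not avail:
--         return {}
--     target = min(max_patches, sum(available_by_key.values()))
--     avs = [v for _, v in avail]
--     counts = [min(a, target // len(avs)) for a in avs]
--     remaining = target - sum(counts)
--     while remaining > 0:
--         m = sum(1 for a, c in zip(avs, counts) if c < a)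
--         if m == 0:
--             break
--         if remaining < m:
--             counts = _give_one_each(avs, counts, remaining)
--             remaining = 0
--         else:
--             q = min(remaining // m, min(a - c for a, c in zip(avs, counts) if c < a))
--             counts = [c + q if c < a else c for a, c in zip(avs, counts)]
--             remaining -= q * m
--     return {k: c for (k, _), c in zip(avail, counts)}
--
-- def _give_one_each(avs, counts, r):
--     out = []
--     for a, c in zip(avs, counts):
--         if c < a and r > 0:
--             out.append(c + 1)
--             r -= 1
--         else:
--             out.append(c)
--     return out
-- ===== Notes on version B (the rewrite author's own statement) =====
-- stated objective: alternative
-- what changed: B replaces A's round-robin while-loop (one +1 per key per pass, repeated until the budget is used up) by a bulk water-filling loop that computes q = min(remaining // m, min slack) and hands out q whole rounds in one list pass, so the loop iterates O(n) times instead of once per leftover unit.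
import Mathlib
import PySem

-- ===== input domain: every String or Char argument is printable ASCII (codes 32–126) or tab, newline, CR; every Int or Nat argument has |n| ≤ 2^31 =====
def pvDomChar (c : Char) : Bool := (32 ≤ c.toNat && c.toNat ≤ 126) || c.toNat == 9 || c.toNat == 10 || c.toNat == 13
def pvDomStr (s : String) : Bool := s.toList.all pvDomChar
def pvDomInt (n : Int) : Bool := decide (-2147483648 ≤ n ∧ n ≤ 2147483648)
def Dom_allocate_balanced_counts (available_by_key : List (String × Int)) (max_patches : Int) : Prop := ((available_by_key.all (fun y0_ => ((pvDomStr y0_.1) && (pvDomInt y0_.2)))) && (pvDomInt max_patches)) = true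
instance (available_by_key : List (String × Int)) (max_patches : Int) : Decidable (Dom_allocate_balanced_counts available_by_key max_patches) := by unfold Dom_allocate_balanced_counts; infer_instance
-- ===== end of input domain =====

-- B replaces A's one-unit-per-key round-robin while-loop by bulk water-level jumps:
-- each loop step hands out q complete rounds at once, so the loop iterates O(#keys) times
-- rather than once per leftover unit.

-- ===== PORT A =====
-- one pass of the `for key in keys` body (the inner loop of A's while), with its
-- `break` when remaining hits 0; returns (counts, remaining, progressed)
def pvARound (avail : PySem.Dict String Int) (keys : List String)
    (counts : PySem.Dict String Int) (remaining : Int) :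
    PySem.Dict String Int × Int × Bool :=
  match keys with
  | [] => (counts, remaining, false)
  | k :: ks =>
    if counts.getD k 0 < avail.getD k 0 then
      let counts' := counts.insert k (counts.getD k 0 + 1)
      if remaining - 1 = 0 then (counts', 0, true)
      else
        let o := pvARound avail ks counts' (remaining - 1)
        (o.1, o.2.1, true)
    else pvARound avail ks counts remaining

-- termination measure fact for the while-loop (cited by pvALoop's decreasing_by)
theorem pvARound_bounds (avail : PySem.Dict String Int) (keys : List String) :
    ∀ (counts : PySem.Dict String Int) (r : Int), 0 < r →
      0 ≤ (pvARound avail keys counts r).2.1 ∧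
      (pvARound avail keys counts r).2.1 ≤ r ∧
      ((pvARound avail keys counts r).2.2 = true → (pvARound avail keys counts r).2.1 < r) := by
  induction keys with
  | nil => intro counts r hr; simp [pvARound]; omega
  | cons k ks ih =>
    intro counts r hr
    simp only [pvARound]
    split
    · split
      · simp; omega
      · rename_i hlt hr1
        have := ih (counts.insert k (counts.getD k 0 + 1)) (r - 1) (by omega)
        dsimp only
        exact ⟨by omega, by omega, fun _ => by omega⟩
    · exact ih counts r hr

-- A's `while remaining > 0` loop
def pvALoop (avail : PySem.Dict String Int) (keys : List String)
    (counts : PySem.Dict String Int) (remaining : Int) : PySem.Dict String Int :=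
  if 0 < remaining then
    let o := pvARound avail keys counts remaining
    if o.2.2 then pvALoop avail keys o.1 o.2.1 else o.1
  else counts
termination_by remaining.toNat
decreasing_by
  have h := pvARound_bounds avail keys counts remaining (by omega)
  rename_i h1 h2
  have := h.2.2 h2
  omega

def allocate_balanced_counts (available_by_key : List (String × Int)) (max_patches : Int) : List (String × Int) :=
  let d := PySem.Dict.ofList available_by_key
  -- keys are str here, so Python's sort key `str` is the identity
  let keys := PySem.List.sorted ((d.items.filter (fun p => decide (p.2 > 0))).map (fun p => p.1)) (fun k => k) false
  if keys = [] then []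
  else
    let target := min max_patches d.values.sum
    -- available_by_key[key]: key comes from d itself, so the lookup cannot raise; getD 0 is exact
    let counts := keys.foldl (fun c k => c.insert k (min (d.getD k 0) (PySem.Int.floordiv target (keys.length : Int)))) PySem.Dict.empty
    let remaining := target - counts.values.sum
    (pvALoop d keys counts remaining).items

-- ===== PORT B =====
-- _give_one_each: +1 to the first r unsaturated slots
def pvGiveOne (avs cs : List Int) (r : Int) : List Int :=
  match avs, cs with
  | a :: avs', c :: cs' =>
      if c < a ∧ 0 < r then (c + 1) :: pvGiveOne avs' cs' (r - 1)
      else c :: pvGiveOne avs' cs' r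
  | _, _ => []

-- the filtered slack list is nonempty whenever this is used (m ≠ 0); default 1 is never read
theorem pvSlackD_pos (l : List (Int × Int)) :
    1 ≤ ((PySem.List.min? ((l.filter (fun p => decide (p.2 < p.1))).map (fun p => p.1 - p.2)) (fun x => x)).getD 1) := by
  cases h : PySem.List.min? ((l.filter (fun p => decide (p.2 < p.1))).map (fun p => p.1 - p.2)) (fun x => x) with
  | none => simp
  | some s =>
    have hm := PySem.List.min?_mem h
    simp only [List.mem_map, List.mem_filter] at hm
    obtain ⟨p, ⟨_, hp⟩, rfl⟩ := hm
    simp at hp ⊢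
    omega

-- B's bulk while-loop: hands out q complete rounds at once
def pvBLoop (avs cs : List Int) (remaining : Int) : List Int :=
  if 0 < remaining then
    let m : Int := ((avs.zip cs).countP (fun p => decide (p.2 < p.1)) : Int)
    if m = 0 then cs
    else if remaining < m then pvGiveOne avs cs remaining
    else
      let q := min (PySem.Int.floordiv remaining m)
        ((PySem.List.min? (((avs.zip cs).filter (fun p => decide (p.2 < p.1))).map (fun p => p.1 - p.2)) (fun x => x)).getD 1)
      pvBLoop avs ((avs.zip cs).map (fun p => if p.2 < p.1 then p.2 + q else p.2)) (remaining - q * m)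
  else cs
termination_by remaining.toNat
decreasing_by
  rename_i h0 hm hrm
  have hq1 : 1 ≤ PySem.Int.floordiv remaining ((avs.zip cs).countP (fun p => decide (p.2 < p.1)) : Int) := by
    rw [PySem.Int.le_floordiv_iff_mul_le (by omega)]
    omega
  have hq2 := pvSlackD_pos (avs.zip cs)
  have hm' : (0:Int) < ((avs.zip cs).countP (fun p => decide (p.2 < p.1)) : Int) := by omega
  have hq : (1:Int) ≤ min (PySem.Int.floordiv remaining ((avs.zip cs).countP (fun p => decide (p.2 < p.1)) : Int))
      ((PySem.List.min? (((avs.zip cs).filter (fun p => decide (p.2 < p.1))).map (fun p => p.1 - p.2)) (fun x => x)).getD 1) :=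
    le_min hq1 hq2
  have hqm : (0:Int) < min (PySem.Int.floordiv remaining ((avs.zip cs).countP (fun p => decide (p.2 < p.1)) : Int))
      ((PySem.List.min? (((avs.zip cs).filter (fun p => decide (p.2 < p.1))).map (fun p => p.1 - p.2)) (fun x => x)).getD 1) *
      ((avs.zip cs).countP (fun p => decide (p.2 < p.1)) : Int) := mul_pos (by omega) hm'
  omega

def allocate_balanced_counts_alt (available_by_key : List (String × Int)) (max_patches : Int) : List (String × Int) :=
  let d := PySem.Dict.ofList available_by_key
  let avail := PySem.List.sorted (d.items.filter (fun p => decide (p.2 > 0))) (fun p => p.1) false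
  if avail = [] then []
  else
    let target := min max_patches d.values.sum
    let avs := avail.map (fun p => p.2)
    let cs := avs.map (fun a => min a (PySem.Int.floordiv target (avs.length : Int)))
    let remaining := target - cs.sum
    -- the final dict comprehension: keys are distinct and in order, so it is this assoc list
    (avail.zip (pvBLoop avs cs remaining)).map (fun p => (p.1.1, p.2))

-- ===== PRECONDITION & SPEC =====
def Spec_allocate_balanced_counts (available_by_key : List (String × Int)) (max_patches : Int) (out : List (String × Int)) : Prop := out = allocate_balanced_counts_alt available_by_key max_patches
instance (available_by_key : List (String × Int)) (max_patches : Int) (out : List (String × Int)) : Decidable (Spec_allocate_balanced_counts available_by_key max_patches out) := by unfold Spec_allocate_balanced_counts; infer_instance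

-- ===== CLAIM (what is proved, stated in full; the proofs are below) =====
def Claim_equal_allocate_balanced_counts : Prop := ∀ (available_by_key : List (String × Int)) (max_patches : Int), Dom_allocate_balanced_counts available_by_key max_patches → Spec_allocate_balanced_counts available_by_key max_patches (allocate_balanced_counts available_by_key max_patches)

-- ===== LEMMAS AND PROOFS =====

-- list-level model of A's inner for-loop (same branch structure as pvARound, values only)
def pvRoundL : List (Int × Int) → Int → (List Int × Int × Bool)
  | [], r => ([], r, false)
  | (a, c) :: t, r =>
    if c < a then
      if r - 1 = 0 then ((c + 1) :: t.map Prod.snd, 0, true)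
      else
        let o := pvRoundL t (r - 1)
        ((c + 1) :: o.1, o.2.1, true)
    else
      let o := pvRoundL t r
      (c :: o.1, o.2.1, o.2.2)

theorem pvRoundL_bounds (acs : List (Int × Int)) :
    ∀ (r : Int), 0 < r →
      0 ≤ (pvRoundL acs r).2.1 ∧ (pvRoundL acs r).2.1 ≤ r ∧
      ((pvRoundL acs r).2.2 = true → (pvRoundL acs r).2.1 < r) := by
  induction acs with
  | nil => intro r hr; simp [pvRoundL]; omega
  | cons p t ih =>
    intro r hr
    obtain ⟨a, c⟩ := p
    simp only [pvRoundL]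
    split
    · split
      · simp; omega
      · have := ih (r - 1) (by omega)
        simp only []
        exact ⟨by omega, by omega, fun _ => by omega⟩
    · have := ih r hr
      simp only []
      exact this

theorem pvRoundL_len (acs : List (Int × Int)) : ∀ r, (pvRoundL acs r).1.length = acs.length := by
  induction acs with
  | nil => intro r; simp [pvRoundL]
  | cons p t ih =>
    intro r
    obtain ⟨a, c⟩ := p
    simp only [pvRoundL]
    split
    · split
      · simp
      · simp [ih]
    · simp [ih]

-- list-level model of A's while-loop
def pvLoopL (avs cs : List Int) (r : Int) : List Int :=
  if 0 < r then
    let o := pvRoundL (avs.zip cs) r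
    if o.2.2 then pvLoopL avs o.1 o.2.1 else o.1
  else cs
termination_by r.toNat
decreasing_by
  rename_i h1 h2
  have h := pvRoundL_bounds (avs.zip cs) r (by omega)
  have := h.2.2 h2
  omega

-- lookup in a dict whose front block has foreign keys
theorem pvGet?_mk_append (done rest : List (String × Int)) (k : String)
    (h : k ∉ done.map Prod.fst) :
    (PySem.Dict.mk (done ++ rest)).get? k = (PySem.Dict.mk rest).get? k := by
  induction done with
  | nil => rfl
  | cons p t ih =>
    obtain ⟨k', v⟩ := p
    simp only [List.map_cons, List.mem_cons, not_or] at h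
    rw [List.cons_append, PySem.Dict.get?_mk_cons, if_neg (by simpa using (Ne.symm h.1)), ih h.2]

-- A's inner for-loop only rewrites the zip-block values, exactly as pvRoundL does
theorem pvARound_sim (avail : PySem.Dict String Int) :
    ∀ (ks : List String) (cs : List Int) (done : List (String × Int)) (r : Int),
      ks.length = cs.length → ((done.map Prod.fst) ++ ks).Nodup →
      pvARound avail ks (PySem.Dict.mk (done ++ ks.zip cs)) r =
        (PySem.Dict.mk (done ++ ks.zip (pvRoundL ((ks.map (fun k => avail.getD k 0)).zip cs) r).1),
         (pvRoundL ((ks.map (fun k => avail.getD k 0)).zip cs) r).2.1,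
         (pvRoundL ((ks.map (fun k => avail.getD k 0)).zip cs) r).2.2) := by
  intro ks
  induction ks with
  | nil => intro cs done r _ _; simp [pvARound, pvRoundL]
  | cons k ks' ih =>
    intro cs done r hlen hnd
    cases cs with
    | nil => simp at hlen
    | cons c cs' =>
      have hlen' : ks'.length = cs'.length := by simpa using hlen
      have hkdone : k ∉ done.map Prod.fst := by
        have hd := (List.nodup_append.mp hnd).2.2
        intro hmem
        exact hd k hmem k (by simp) rfl
      have hkks : k ∉ ks' := by
        have := (List.nodup_append.mp hnd).2.1
        simpa using (List.nodup_cons.mp this).1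
      have hget : (PySem.Dict.mk (done ++ (k, c) :: ks'.zip cs')).get? k = some c := by
        rw [pvGet?_mk_append _ _ _ hkdone, PySem.Dict.get?_mk_cons]
        simp
      have hgetD : (PySem.Dict.mk (done ++ (k, c) :: ks'.zip cs')).getD k 0 = c := by
        rw [PySem.Dict.getD, hget]; rfl
      have hcont : (PySem.Dict.mk (done ++ (k, c) :: ks'.zip cs')).contains k = true := by
        rw [PySem.Dict.contains_eq_isSome_get?, hget]; rfl
      have hins : (PySem.Dict.mk (done ++ (k, c) :: ks'.zip cs')).insert k (c + 1) =
          PySem.Dict.mk (done ++ (k, c + 1) :: ks'.zip cs') := by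
        apply PySem.Dict.ext
        rw [PySem.Dict.items_insert_of_contains _ _ hcont]
        show List.map _ (done ++ (k, c) :: ks'.zip cs') = _
        rw [List.map_append, List.map_cons]
        congr 1
        · apply List.map_congr_left ?_ |>.trans (List.map_id _)
          intro p hp
          have : p.1 ≠ k := by
            intro he
            exact hkdone (he ▸ List.mem_map_of_mem hp)
          simp [this]
        · congr 1
          · simp
          · apply List.map_congr_left ?_ |>.trans (List.map_id _)
            intro p hp
            have : p.1 ≠ k := by
              intro he
              exact hkks (he ▸ (List.of_mem_zip hp).1)
            simp [this]
      simp only [List.zip_cons_cons, List.map_cons, pvARound, pvRoundL, hgetD]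
      by_cases hc : c < avail.getD k 0
      · rw [if_pos hc, if_pos hc, hins]
        by_cases hr1 : r - 1 = 0
        · rw [if_pos hr1, if_pos hr1]
          have hz : List.map Prod.snd ((ks'.map (fun k => avail.getD k 0)).zip cs') = cs' := by
            rw [List.map_snd_zip (by simp [hlen'])]
          simp only [List.zip_cons_cons, hz]
        · rw [if_neg hr1, if_neg hr1]
          have hnd' : (((done ++ [(k, c + 1)]).map Prod.fst) ++ ks').Nodup := by
            rw [List.map_append]
            simpa [List.append_assoc] using hnd
          have hrec := ih cs' (done ++ [(k, c + 1)]) (r - 1) hlen' hnd'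
          have he : (done ++ [(k, c + 1)]) ++ ks'.zip cs' = done ++ (k, c + 1) :: ks'.zip cs' := by
            simp
          rw [he] at hrec
          simp only [hrec, List.zip_cons_cons]
          simp [List.append_assoc]
      · rw [if_neg hc, if_neg hc]
        have hnd' : (((done ++ [(k, c)]).map Prod.fst) ++ ks').Nodup := by
          rw [List.map_append]
          simpa [List.append_assoc] using hnd
        have hrec := ih cs' (done ++ [(k, c)]) r hlen' hnd'
        have he : (done ++ [(k, c)]) ++ ks'.zip cs' = done ++ (k, c) :: ks'.zip cs' := by
          simp
        rw [he] at hrec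
        simp only [hrec, List.zip_cons_cons]
        simp [List.append_assoc]

-- A's while-loop is the list-level loop on the values
theorem pvALoop_sim (avail : PySem.Dict String Int) :
    ∀ (n : Nat) (ks : List String) (cs : List Int) (r : Int), r.toNat ≤ n →
      ks.length = cs.length → ks.Nodup →
      pvALoop avail ks (PySem.Dict.mk (ks.zip cs)) r =
        PySem.Dict.mk (ks.zip (pvLoopL (ks.map (fun k => avail.getD k 0)) cs r)) := by
  intro n
  induction n with
  | zero =>
    intro ks cs r hn hlen hnd
    rw [pvALoop, pvLoopL, if_neg (by omega), if_neg (by omega)]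
  | succ n ihn =>
    intro ks cs r hn hlen hnd
    rw [pvALoop, pvLoopL]
    by_cases hr : 0 < r
    · rw [if_pos hr, if_pos hr]
      have hsim := pvARound_sim avail ks cs [] r hlen (by simpa using hnd)
      simp only [List.nil_append] at hsim
      simp only [hsim]
      by_cases hp : (pvRoundL ((ks.map (fun k => avail.getD k 0)).zip cs) r).2.2 = true
      · rw [if_pos hp, if_pos hp]
        have hb := pvRoundL_bounds ((ks.map (fun k => avail.getD k 0)).zip cs) r hr
        have hblt := hb.2.2 hp
        have hlen2 : ks.length = (pvRoundL ((ks.map (fun k => avail.getD k 0)).zip cs) r).1.length := by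
          rw [pvRoundL_len]
          simp [hlen]
        exact ihn ks _ _ (by omega) hlen2 hnd
      · rw [if_neg hp, if_neg hp]
    · rw [if_neg hr, if_neg hr]

theorem pvGiveOne_zero (avs : List Int) :
    ∀ (cs : List Int) (r : Int), avs.length = cs.length → r ≤ 0 → pvGiveOne avs cs r = cs := by
  induction avs with
  | nil => intro cs r h _; cases cs with
    | nil => rfl
    | cons c cs' => simp at h
  | cons a avs' ih =>
    intro cs r h hr
    cases cs with
    | nil => simp at h
    | cons c cs' =>
      simp only [pvGiveOne]
      rw [if_neg (by omega), ih cs' r (by simpa using h) hr]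

-- a full round: every unsaturated slot gains 1
theorem pvRoundL_full (acs : List (Int × Int)) :
    ∀ (r : Int), 0 < r → (acs.countP (fun p => decide (p.2 < p.1)) : Int) ≤ r →
      pvRoundL acs r = (acs.map (fun p => if p.2 < p.1 then p.2 + 1 else p.2),
        r - (acs.countP (fun p => decide (p.2 < p.1)) : Int),
        decide (0 < acs.countP (fun p => decide (p.2 < p.1)))) := by
  induction acs with
  | nil => intro r h1 h2; simp [pvRoundL]
  | cons p t ih =>
    intro r h1 h2
    obtain ⟨a, c⟩ := p
    by_cases hc : c < a
    · have hcnt : ((a,c) :: t).countP (fun p => decide (p.2 < p.1)) = t.countP (fun p => decide (p.2 < p.1)) + 1 := by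
        simp [hc]
      rw [hcnt] at h2 ⊢
      by_cases hr1 : r - 1 = 0
      · have ht0 : t.countP (fun p => decide (p.2 < p.1)) = 0 := by omega
        have hmap : t.map (fun p => if p.2 < p.1 then p.2 + 1 else p.2) = t.map Prod.snd := by
          apply List.map_congr_left
          intro x hx
          have hnx := (List.countP_eq_zero.mp ht0) x hx
          have hnx' : ¬ (x.2 < x.1) := by simpa using hnx
          rw [if_neg hnx']
        simp only [pvRoundL, if_pos hc, if_pos hr1]
        rw [List.map_cons, if_pos hc, hmap, ht0]
        simp only [Prod.mk.injEq, true_and]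
        exact ⟨by push_cast; omega, by simp⟩
      · have := ih (r - 1) (by omega) (by push_cast at h2 ⊢; omega)
        simp only [pvRoundL, if_pos hc, if_neg hr1, this]
        rw [List.map_cons, if_pos hc]
        simp only [Prod.mk.injEq, true_and]
        exact ⟨by push_cast; omega, by simp⟩
    · have hcnt : ((a,c) :: t).countP (fun p => decide (p.2 < p.1)) = t.countP (fun p => decide (p.2 < p.1)) := by
        simp [hc]
      rw [hcnt] at h2 ⊢
      have := ih r h1 h2
      simp only [pvRoundL, if_neg hc, this]
      rw [List.map_cons, if_neg hc]

-- a partial round: the first r unsaturated slots gain 1 and the loop ends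
theorem pvRoundL_partial (avs : List Int) :
    ∀ (cs : List Int) (r : Int), avs.length = cs.length → 0 < r →
      r < ((avs.zip cs).countP (fun p => decide (p.2 < p.1)) : Int) →
      pvRoundL (avs.zip cs) r = (pvGiveOne avs cs r, 0, true) := by
  induction avs with
  | nil => intro cs r h h1 h2; exfalso; simp at h2; omega
  | cons a avs' ih =>
    intro cs r h h1 h2
    cases cs with
    | nil => simp at h
    | cons c cs' =>
      have hl : avs'.length = cs'.length := by simpa using h
      rw [List.zip_cons_cons] at h2 ⊢
      by_cases hc : c < a
      · rw [List.countP_cons] at h2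
        simp only [hc, decide_true] at h2
        simp only [pvRoundL, if_pos hc]
        simp only [pvGiveOne]
        rw [if_pos (And.intro hc h1)]
        by_cases hr1 : r - 1 = 0
        · rw [if_pos hr1]
          rw [pvGiveOne_zero avs' cs' (r-1) hl (by omega)]
          rw [List.map_snd_zip (by omega)]
        · rw [if_neg hr1]
          rw [ih cs' (r-1) hl (by omega) (by push_cast at h2 ⊢; omega)]
      · rw [List.countP_cons] at h2
        simp only [hc, decide_false] at h2
        simp only [pvRoundL, if_neg hc]
        simp only [pvGiveOne]
        rw [if_neg (by intro hx; exact hc hx.1)]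
        rw [ih cs' r hl h1 (by push_cast at h2 ⊢; omega)]

theorem pvZip_map_snd (avs : List Int) :
    ∀ (cs : List Int) (g : Int × Int → Int), avs.length = cs.length →
      avs.zip ((avs.zip cs).map g) = (avs.zip cs).map (fun p => (p.1, g p)) := by
  induction avs with
  | nil => intro cs g h; simp
  | cons a avs' ih =>
    intro cs g h
    cases cs with
    | nil => simp at h
    | cons c cs' =>
      simp only [List.zip_cons_cons, List.map_cons]
      rw [ih cs' g (by simpa using h)]

-- j complete rounds at once
theorem pvLoopL_bulk :
    ∀ (j : Nat) (avs cs : List Int) (r : Int), avs.length = cs.length →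
      (j : Int) * ((avs.zip cs).countP (fun p => decide (p.2 < p.1)) : Int) ≤ r →
      (∀ p ∈ avs.zip cs, p.2 < p.1 → (j : Int) ≤ p.1 - p.2) →
      pvLoopL avs cs r =
        pvLoopL avs ((avs.zip cs).map (fun p => if p.2 < p.1 then p.2 + (j : Int) else p.2))
          (r - (j : Int) * ((avs.zip cs).countP (fun p => decide (p.2 < p.1)) : Int)) := by
  intro j
  induction j with
  | zero =>
    intro avs cs r hlen hr hs
    have h0 : (avs.zip cs).map (fun p => if p.2 < p.1 then p.2 + ((0:Nat) : Int) else p.2) = cs := by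
      have h1 : (avs.zip cs).map (fun p => if p.2 < p.1 then p.2 + ((0:Nat) : Int) else p.2) =
          (avs.zip cs).map Prod.snd := by
        apply List.map_congr_left
        intro p hp
        split <;> simp
      rw [h1, List.map_snd_zip (by omega)]
    rw [h0]
    norm_num
  | succ j ihj =>
    intro avs cs r hlen hr hs
    by_cases hm : (avs.zip cs).countP (fun p => decide (p.2 < p.1)) = 0
    · have h0 : (avs.zip cs).map (fun p => if p.2 < p.1 then p.2 + ((j+1:Nat) : Int) else p.2) = cs := by
        have h1 : (avs.zip cs).map (fun p => if p.2 < p.1 then p.2 + ((j+1:Nat) : Int) else p.2) =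
            (avs.zip cs).map Prod.snd := by
          apply List.map_congr_left
          intro p hp
          have := (List.countP_eq_zero.mp hm) p hp
          rw [if_neg (by simpa using this)]
        rw [h1, List.map_snd_zip (by omega)]
      rw [h0, hm]
      norm_num
    · -- at least one unsaturated slot; one full round then IH
      have hm1 : 1 ≤ (avs.zip cs).countP (fun p => decide (p.2 < p.1)) := by omega
      have hcast1 : (1:Int) ≤ ((avs.zip cs).countP (fun p => decide (p.2 < p.1)) : Int) := by
        exact_mod_cast hm1
      have hjcast : (1:Int) ≤ ((j+1 : Nat) : Int) := by push_cast; omega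
      have hprod : (1:Int) ≤ ((j+1 : Nat) : Int) * ((avs.zip cs).countP (fun p => decide (p.2 < p.1)) : Int) := by
        nlinarith
      have hr0 : 0 < r := by omega
      have hle : ((avs.zip cs).countP (fun p => decide (p.2 < p.1)) : Int) ≤ r := by nlinarith
      have hflag : decide (0 < (avs.zip cs).countP (fun p => decide (p.2 < p.1))) = true := by
        simpa using hm1
      have hstep : pvLoopL avs cs r =
          pvLoopL avs ((avs.zip cs).map (fun p => if p.2 < p.1 then p.2 + 1 else p.2))
            (r - ((avs.zip cs).countP (fun p => decide (p.2 < p.1)) : Int)) := by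
        conv_lhs => rw [pvLoopL]
        rw [if_pos hr0]
        simp only [pvRoundL_full (avs.zip cs) r hr0 hle, hflag, if_pos]
      rw [hstep]
      have hz := pvZip_map_snd avs cs (fun p => if p.2 < p.1 then p.2 + 1 else p.2) hlen
      cases j with
      | zero =>
        have : ((0+1 : Nat) : Int) = 1 := by norm_num
        rw [this]
        norm_num
      | succ j' =>
        -- lengths for the IH
        have hlen1 : avs.length = ((avs.zip cs).map (fun p => if p.2 < p.1 then p.2 + 1 else p.2)).length := by
          simp [List.length_zip, hlen]
        -- the unsaturated set is unchanged after one round (slack was ≥ j'+2)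
        have hcnt : ((avs.zip ((avs.zip cs).map (fun p => if p.2 < p.1 then p.2 + 1 else p.2))).countP
            (fun p => decide (p.2 < p.1))) = (avs.zip cs).countP (fun p => decide (p.2 < p.1)) := by
          rw [hz, List.countP_map]
          apply List.countP_congr
          intro p hp
          by_cases hu : p.2 < p.1
          · have := hs p hp hu
            have h2 : p.2 + 1 < p.1 := by push_cast at this; omega
            simp [Function.comp, hu, h2]
          · simp [Function.comp, hu]
        have hs1 : ∀ p ∈ avs.zip ((avs.zip cs).map (fun p => if p.2 < p.1 then p.2 + 1 else p.2)),
            p.2 < p.1 → ((j'+1 : Nat) : Int) ≤ p.1 - p.2 := by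
          rw [hz]
          intro p hp hu
          simp only [List.mem_map] at hp
          obtain ⟨x, hx, rfl⟩ := hp
          by_cases hxu : x.2 < x.1
          · have := hs x hx hxu
            simp only [if_pos hxu] at hu ⊢
            push_cast at this ⊢
            omega
          · simp only [if_neg hxu] at hu ⊢
            omega
        have hr1 : ((j'+1 : Nat) : Int) *
            ((avs.zip ((avs.zip cs).map (fun p => if p.2 < p.1 then p.2 + 1 else p.2))).countP
              (fun p => decide (p.2 < p.1)) : Int) ≤
            r - ((avs.zip cs).countP (fun p => decide (p.2 < p.1)) : Int) := by
          rw [hcnt]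
          push_cast at hr ⊢
          nlinarith
        have := ihj avs ((avs.zip cs).map (fun p => if p.2 < p.1 then p.2 + 1 else p.2))
          (r - ((avs.zip cs).countP (fun p => decide (p.2 < p.1)) : Int)) hlen1 hr1 hs1
        rw [this, hcnt]
        -- the two bulk maps compose
        have hcomp : (avs.zip ((avs.zip cs).map (fun p => if p.2 < p.1 then p.2 + 1 else p.2))).map
            (fun p => if p.2 < p.1 then p.2 + ((j'+1 : Nat) : Int) else p.2) =
            (avs.zip cs).map (fun p => if p.2 < p.1 then p.2 + ((j'+1+1 : Nat) : Int) else p.2) := by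
          rw [hz, List.map_map]
          apply List.map_congr_left
          intro x hx
          by_cases hxu : x.2 < x.1
          · have := hs x hx hxu
            have h2 : x.2 + 1 < x.1 := by push_cast at this; omega
            simp only [Function.comp, if_pos hxu, if_pos h2]
            push_cast
            ring
          · simp only [Function.comp, if_neg hxu]
        rw [hcomp]
        congr 1
        push_cast
        ring

-- the two while-loops agree
theorem pvLoopL_eq_pvBLoop :
    ∀ (n : Nat) (avs cs : List Int) (r : Int), r.toNat ≤ n → avs.length = cs.length →
      pvLoopL avs cs r = pvBLoop avs cs r := by
  intro n
  induction n with
  | zero =>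
    intro avs cs r hn hlen
    rw [pvLoopL, pvBLoop, if_neg (by omega), if_neg (by omega)]
  | succ n ihn =>
    intro avs cs r hn hlen
    by_cases hr : 0 < r
    · rw [pvBLoop, if_pos hr]
      dsimp only
      by_cases hm : ((avs.zip cs).countP (fun p => decide (p.2 < p.1)) : Int) = 0
      · rw [if_pos hm]
        have hm0 : (avs.zip cs).countP (fun p => decide (p.2 < p.1)) = 0 := by exact_mod_cast hm
        rw [pvLoopL, if_pos hr]
        simp only [pvRoundL_full (avs.zip cs) r hr (by rw [hm0]; push_cast; omega)]
        rw [hm0]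
        have hcs : (avs.zip cs).map (fun p => if p.2 < p.1 then p.2 + 1 else p.2) = cs := by
          have h1 : (avs.zip cs).map (fun p => if p.2 < p.1 then p.2 + 1 else p.2) =
              (avs.zip cs).map Prod.snd := by
            apply List.map_congr_left
            intro p hp
            have := (List.countP_eq_zero.mp hm0) p hp
            rw [if_neg (by simpa using this)]
          rw [h1, List.map_snd_zip (by omega)]
        simp [hcs]
      · rw [if_neg hm]
        by_cases hrm : r < ((avs.zip cs).countP (fun p => decide (p.2 < p.1)) : Int)
        · rw [if_pos hrm]
          rw [pvLoopL, if_pos hr, pvRoundL_partial avs cs r hlen hr hrm]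
          dsimp only
          rw [if_pos rfl, pvLoopL, if_neg (by omega)]
        · rw [if_neg hrm]
          have hmpos : (0:Int) < ((avs.zip cs).countP (fun p => decide (p.2 < p.1)) : Int) := by
            have : (0:Int) ≤ ((avs.zip cs).countP (fun p => decide (p.2 < p.1)) : Int) := by positivity
            omega
          have hq1 : (1:Int) ≤ min
              (PySem.Int.floordiv r ((avs.zip cs).countP (fun p => decide (p.2 < p.1)) : Int))
              ((PySem.List.min? (((avs.zip cs).filter (fun p => decide (p.2 < p.1))).map (fun p => p.1 - p.2)) (fun x => x)).getD 1) := by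
            refine le_min ?_ (pvSlackD_pos (avs.zip cs))
            rw [PySem.Int.le_floordiv_iff_mul_le hmpos]
            omega
          set q := min
              (PySem.Int.floordiv r ((avs.zip cs).countP (fun p => decide (p.2 < p.1)) : Int))
              ((PySem.List.min? (((avs.zip cs).filter (fun p => decide (p.2 < p.1))).map (fun p => p.1 - p.2)) (fun x => x)).getD 1) with hqdef
          have hqm : q * ((avs.zip cs).countP (fun p => decide (p.2 < p.1)) : Int) ≤ r := by
            have h1 : q ≤ PySem.Int.floordiv r ((avs.zip cs).countP (fun p => decide (p.2 < p.1)) : Int) :=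
              min_le_left _ _
            have := (PySem.Int.le_floordiv_iff_mul_le hmpos).mp h1
            exact this
          have hslack : ∀ p ∈ avs.zip cs, p.2 < p.1 → q ≤ p.1 - p.2 := by
            intro p hp hu
            have hpf : p ∈ (avs.zip cs).filter (fun p => decide (p.2 < p.1)) := by
              rw [List.mem_filter]
              exact ⟨hp, by simpa using hu⟩
            have hmem : p.1 - p.2 ∈ ((avs.zip cs).filter (fun p => decide (p.2 < p.1))).map (fun p => p.1 - p.2) :=
              List.mem_map_of_mem hpf
            cases hmin : PySem.List.min? (((avs.zip cs).filter (fun p => decide (p.2 < p.1))).map (fun p => p.1 - p.2)) (fun x => x) with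
            | none =>
              rw [PySem.List.min?_eq_none_iff] at hmin
              rw [hmin] at hmem
              simp at hmem
            | some sm =>
              have hle := PySem.List.min?_isMin hmin _ hmem
              have hq2 : q ≤ sm := by
                have := min_le_right
                  (PySem.Int.floordiv r ((avs.zip cs).countP (fun p => decide (p.2 < p.1)) : Int))
                  ((PySem.List.min? (((avs.zip cs).filter (fun p => decide (p.2 < p.1))).map (fun p => p.1 - p.2)) (fun x => x)).getD 1)
                rw [← hqdef] at this
                rw [hmin] at this
                simpa using this
              simp only at hle
              omega
          have ht : ((q.toNat : Nat) : Int) = q := Int.toNat_of_nonneg (by omega)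
          have hbulk := pvLoopL_bulk q.toNat avs cs r hlen (by rw [ht]; exact hqm) (by rw [ht]; exact hslack)
          rw [ht] at hbulk
          rw [hbulk]
          have hlen1 : avs.length = ((avs.zip cs).map (fun p => if p.2 < p.1 then p.2 + q else p.2)).length := by
            simp [List.length_zip, hlen]
          have hrn : (r - q * ((avs.zip cs).countP (fun p => decide (p.2 < p.1)) : Int)).toNat ≤ n := by
            have : (1:Int) ≤ q * ((avs.zip cs).countP (fun p => decide (p.2 < p.1)) : Int) := by nlinarith
            omega
          exact ihn avs _ _ hrn hlen1
    · rw [pvLoopL, pvBLoop, if_neg hr, if_neg hr]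

-- a stable sort by the first component commutes with projecting to it
theorem pvMap_insertBy (x : String × Int) :
    ∀ (ys : List (String × Int)),
      (PySem.List.insertBy (fun a b => decide (a.1 < b.1)) x ys).map Prod.fst =
        PySem.List.insertBy (fun a b => decide (a < b)) x.1 (ys.map Prod.fst) := by
  intro ys
  induction ys with
  | nil => rfl
  | cons y t ih =>
    simp only [PySem.List.insertBy, List.map_cons]
    by_cases h : x.1 < y.1
    · rw [if_pos (by simpa using h), if_pos (by simpa using h)]
      simp
    · rw [if_neg (by simpa using h), if_neg (by simpa using h)]
      simp only [List.map_cons]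
      rw [ih]

theorem pvSorted_map_fst (l : List (String × Int)) :
    PySem.List.sorted (l.map Prod.fst) (fun k => k) false =
      (PySem.List.sorted l (fun p => p.1) false).map Prod.fst := by
  rw [PySem.List.sorted_eq_foldl_insertBy, PySem.List.sorted_eq_foldl_insertBy]
  suffices h : ∀ (acc : List (String × Int)),
      (l.foldl (fun acc x => PySem.List.insertBy (fun a b => decide (a.1 < b.1)) x acc) acc).map Prod.fst =
        (l.map Prod.fst).foldl (fun acc x => PySem.List.insertBy (fun a b => decide (a < b)) x acc) (acc.map Prod.fst) by
    have := (h []).symm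
    simpa using this
  induction l with
  | nil => intro acc; rfl
  | cons p t ih =>
    intro acc
    simp only [List.map_cons, List.foldl_cons]
    rw [ih, pvMap_insertBy]

-- the whole pipeline, assembled
theorem pvMain (available_by_key : List (String × Int)) (max_patches : Int) :
    allocate_balanced_counts available_by_key max_patches =
      allocate_balanced_counts_alt available_by_key max_patches := by
  simp only [allocate_balanced_counts, allocate_balanced_counts_alt]
  set d := PySem.Dict.ofList available_by_key with hd
  set F := d.items.filter (fun p => decide (p.2 > 0)) with hF
  have hkeys : PySem.List.sorted (F.map (fun p => p.1)) (fun k => k) false =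
      (PySem.List.sorted F (fun p => p.1) false).map Prod.fst := by
    have := pvSorted_map_fst F
    simpa using this
  set avail := PySem.List.sorted F (fun p => p.1) false with havail
  rw [hkeys]
  by_cases hemp : avail = []
  · rw [if_pos (by rw [hemp]; rfl), if_pos hemp]
  · rw [if_neg (by simpa using hemp), if_neg hemp]
    have hndk : d.keys.Nodup := PySem.Dict.nodup_keys_ofList available_by_key
    have hndF : (F.map Prod.fst).Nodup := by
      have hsub : List.Sublist (F.map Prod.fst) (d.items.map Prod.fst) :=
        List.Sublist.map Prod.fst List.filter_sublist
      exact hndk.sublist hsub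
    have hnd : ((avail.map Prod.fst)).Nodup := by
      have hperm : avail.Perm F := PySem.List.sorted_perm F (fun p => p.1) false
      exact ((hperm.map Prod.fst).symm.nodup) hndF
    have hval : ∀ p ∈ avail, d.getD p.1 0 = p.2 := by
      intro p hp
      have hpF : p ∈ F := (PySem.List.mem_sorted _ _ _ _).mp hp
      have hpi : p ∈ d.items := (List.mem_filter.mp hpF).1
      exact PySem.Dict.getD_of_mem_items d (by exact (Prod.mk.eta (p := p)) ▸ hpi) hndk 0
    simp only [List.length_map]
    set target := min max_patches d.values.sum with htarget
    set base := PySem.Int.floordiv target (avail.length : Int) with hbase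
    set CS := avail.map (fun p => min p.2 base) with hCS
    have hCS2 : (avail.map (fun p => p.2)).map (fun a => min a base) = CS := by
      rw [hCS, List.map_map]
      rfl
    rw [hCS2]
    -- the initial counts dict of A
    have hinit : ((avail.map Prod.fst).foldl
        (fun c k => c.insert k (min (d.getD k 0) base)) PySem.Dict.empty) =
        PySem.Dict.mk ((avail.map Prod.fst).zip CS) := by
      apply PySem.Dict.ext
      rw [PySem.Dict.items_foldl_insert_fresh (avail.map Prod.fst) (fun a => a)
        (fun k => min (d.getD k 0) base) PySem.Dict.empty
        (by intro a _; simp [PySem.Dict.contains_empty])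
        (by simpa [List.map_id] using hnd)]
      show _ ++ _ = ((avail.map Prod.fst).zip CS)
      rw [hCS, List.zip_map']
      simp only [List.map_map]
      apply List.map_congr_left
      intro p hp
      simp [hval p hp]
    have hAS : (avail.map Prod.fst).map (fun k => d.getD k 0) = avail.map (fun p => p.2) := by
      rw [List.map_map]
      apply List.map_congr_left
      intro p hp
      simp [hval p hp]
    have hvals : (PySem.Dict.mk ((avail.map Prod.fst).zip CS)).values = CS := by
      show List.map _ _ = CS
      rw [List.map_snd_zip (by simp [hCS])]
    rw [hinit, hvals]
    set rem := target - CS.sum with hrem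
    have hsim := pvALoop_sim d rem.toNat (avail.map Prod.fst) CS rem (le_refl _)
      (by simp [hCS]) hnd
    rw [hsim, hAS]
    have hloop := pvLoopL_eq_pvBLoop rem.toNat (avail.map (fun p => p.2)) CS rem (le_refl _)
      (by simp [hCS])
    rw [hloop]
    show ((avail.map Prod.fst).zip (pvBLoop (avail.map (fun p => p.2)) CS rem)) = _
    rw [List.zip_map_left]
    apply List.map_congr_left
    intro p hp
    rfl

-- ===== VERDICT (by name: the statement is the Claim_ definition above) =====
theorem allocate_balanced_counts_spec : Claim_equal_allocate_balanced_counts := by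
  intro available_by_key max_patches _
  exact pvMain available_by_key max_patches
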